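-- pv_equiv track=rewrite | github.com/daddyholnes/Podplay-Sanctuary | backend/services/discovery_agent_service.py | _deduplicate_discoveries
-- ===== SOURCE A (Python) =====
-- from typing import Dict, Any, List, Optional
--
-- def _deduplicate_discoveries(servers: List[Dict]) -> List[Dict]:
--     """Remove duplicate discoveries based on repository URL"""
--     seen_urls = set()
--     unique_servers = []
--
--     for server in servers:
--         repo_url = server.get('repository_url', '')
--         if repo_url not in seen_urls:
--             seen_urls.add(repo_url)
--             unique_servers.append(server)
--
--     return unique_servers
-- ===== SOURCE B (Python) =====
-- def _deduplicate_discoveries(servers):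
--     """Remove duplicate discoveries based on repository URL (sieve:
--     take the next server, drop every later server with the same URL, repeat)."""
--     unique = []
--     remaining = servers
--     while remaining:
--         head = remaining[0]
--         url = head.get('repository_url', '')
--         unique.append(head)
--         remaining = [s for s in remaining[1:] if s.get('repository_url', '') != url]
--     return unique
-- ===== Notes on version B (the rewrite author's own statement) =====
-- stated objective: alternative
-- what changed: Replaces the single pass with a mutable seen-set and membership branch by a sieve recursion: keep the first server, filter out all later servers sharing its repository URL, and recurse on the remainder (no auxiliary seen structure at all).
import Mathlib
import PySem

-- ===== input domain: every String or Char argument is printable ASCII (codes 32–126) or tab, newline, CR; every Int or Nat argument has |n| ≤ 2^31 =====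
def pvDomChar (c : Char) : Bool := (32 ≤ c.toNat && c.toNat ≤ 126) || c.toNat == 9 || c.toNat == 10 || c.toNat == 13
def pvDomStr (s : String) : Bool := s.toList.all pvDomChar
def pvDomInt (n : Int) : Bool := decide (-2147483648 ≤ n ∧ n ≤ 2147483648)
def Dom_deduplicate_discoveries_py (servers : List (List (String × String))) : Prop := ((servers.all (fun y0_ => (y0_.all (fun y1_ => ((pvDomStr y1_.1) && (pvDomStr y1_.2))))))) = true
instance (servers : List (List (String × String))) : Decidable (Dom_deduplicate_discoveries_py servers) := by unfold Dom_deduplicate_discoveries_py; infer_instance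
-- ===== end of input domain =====

-- B replaces A's seen-set single pass by a sieve loop (take the next server, filter out every
-- later one with the same URL, repeat); alternative structure, same result.

-- server.get('repository_url', ''): first-match lookup on the association list (exact under the
-- type convention: dicts are association lists in insertion order, lookup = first match)
def pvGetUrl (server : List (String × String)) : String :=
  (server.lookup "repository_url").getD ""

-- ===== PORT A =====
-- the for-loop of A, carrying the seen set and the output list as state
def pvDedupLoop : List (List (String × String)) → PySem.Set String →
    List (List (String × String)) → List (List (String × String))
  | [], _, acc => acc
  | server :: rest, seen, acc =>
      let repo_url := pvGetUrl server
      if PySem.Set.contains seen repo_url then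
        pvDedupLoop rest seen acc
      else
        pvDedupLoop rest (PySem.Set.add seen repo_url) (acc ++ [server])

def deduplicate_discoveries_py (servers : List (List (String × String))) : List (List (String × String)) :=
  pvDedupLoop servers PySem.Set.empty []

-- ===== PORT B =====
-- B's while loop: state = (remaining, unique); each iteration appends the head and filters the tail
def pvSieveLoop (remaining unique : List (List (String × String))) : List (List (String × String)) :=
  match remaining with
  | [] => unique
  | head :: tail =>
      let url := pvGetUrl head
      pvSieveLoop (tail.filter (fun s => pvGetUrl s != url)) (unique ++ [head])
termination_by remaining.length
decreasing_by simpa using Nat.lt_succ_of_le (List.length_filter_le _ _)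

def deduplicate_discoveries_py_alt (servers : List (List (String × String))) : List (List (String × String)) :=
  pvSieveLoop servers []

-- ===== PRECONDITION & SPEC =====
def Spec_deduplicate_discoveries_py (servers : List (List (String × String))) (out : List (List (String × String))) : Prop := out = deduplicate_discoveries_py_alt servers
instance (servers : List (List (String × String))) (out : List (List (String × String))) : Decidable (Spec_deduplicate_discoveries_py servers out) := by unfold Spec_deduplicate_discoveries_py; infer_instance

-- ===== CLAIM (what is proved, stated in full; the proofs are below) =====
def Claim_equal_deduplicate_discoveries_py : Prop := ∀ (servers : List (List (String × String))), Dom_deduplicate_discoveries_py servers → Spec_deduplicate_discoveries_py servers (deduplicate_discoveries_py servers)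

-- ===== LEMMAS AND PROOFS =====

-- proof-side recursive form of B's sieve (no accumulator)
def pvSieve (servers : List (List (String × String))) : List (List (String × String)) :=
  match servers with
  | [] => []
  | head :: tail =>
      head :: pvSieve (tail.filter (fun s => pvGetUrl s != pvGetUrl head))
termination_by servers.length
decreasing_by simpa using Nat.lt_succ_of_le (List.length_filter_le _ _)

-- B's accumulator loop computes unique ++ pvSieve remaining
theorem pvSieveLoop_eq (n : Nat) (xs : List (List (String × String))) (hn : xs.length ≤ n)
    (unique : List (List (String × String))) :
    pvSieveLoop xs unique = unique ++ pvSieve xs := by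
  induction n generalizing xs unique with
  | zero =>
      have : xs = [] := List.eq_nil_of_length_eq_zero (Nat.le_zero.mp hn)
      subst this
      simp [pvSieveLoop, pvSieve]
  | succ n ih =>
      match xs with
      | [] => simp [pvSieveLoop, pvSieve]
      | s :: rest =>
          have hlen : (rest.filter (fun t => pvGetUrl t != pvGetUrl s)).length ≤ n :=
            Nat.le_trans (List.length_filter_le _ _)
              (Nat.lt_succ_iff.mp (Nat.lt_of_lt_of_le (by simp) hn))
          rw [pvSieveLoop, pvSieve, ih _ hlen]
          simp

theorem pv_contains_add (seen : PySem.Set String) (u v : String) :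
    PySem.Set.contains (PySem.Set.add seen u) v = (PySem.Set.contains seen v || v == u) := by
  rw [Bool.eq_iff_iff]
  simp [PySem.Set.mem_add]

-- A's loop from an arbitrary state equals acc ++ (the sieve of the not-yet-seen servers)
theorem pvDedupLoop_eq (n : Nat) (xs : List (List (String × String)))
    (hn : xs.length ≤ n) (seen : PySem.Set String) (acc : List (List (String × String))) :
    pvDedupLoop xs seen acc
      = acc ++ pvSieve (xs.filter (fun t => !(PySem.Set.contains seen (pvGetUrl t)))) := by
  induction n generalizing xs seen acc with
  | zero =>
      have : xs = [] := List.eq_nil_of_length_eq_zero (Nat.le_zero.mp hn)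
      subst this
      simp [pvDedupLoop, pvSieve]
  | succ n ih =>
      match xs with
      | [] => simp [pvDedupLoop, pvSieve]
      | s :: rest =>
          have hrest : rest.length ≤ n := Nat.lt_succ_iff.mp (Nat.lt_of_lt_of_le (by simp) hn)
          rw [pvDedupLoop]
          by_cases h : PySem.Set.contains seen (pvGetUrl s) = true
          · rw [if_pos h, ih rest hrest seen acc]
            have : (s :: rest).filter (fun t => !(PySem.Set.contains seen (pvGetUrl t)))
                = rest.filter (fun t => !(PySem.Set.contains seen (pvGetUrl t))) := by
              rw [List.filter_cons_of_neg (by rw [h]; simp)]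
            rw [this]
          · rw [if_neg h, ih rest hrest (PySem.Set.add seen (pvGetUrl s)) (acc ++ [s])]
            have hb : (!(PySem.Set.contains seen (pvGetUrl s))) = true := by
              cases hc : PySem.Set.contains seen (pvGetUrl s)
              · rfl
              · exact absurd hc h
            have hfilter : rest.filter (fun t => !(PySem.Set.contains (PySem.Set.add seen (pvGetUrl s)) (pvGetUrl t)))
                = (rest.filter (fun t => !(PySem.Set.contains seen (pvGetUrl t)))).filter
                    (fun t => pvGetUrl t != pvGetUrl s) := by
              rw [List.filter_filter]
              apply List.filter_congr
              intro t _
              rw [pv_contains_add]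
              cases hc : PySem.Set.contains seen (pvGetUrl t) <;> cases hb2 : pvGetUrl t == pvGetUrl s <;>
                simp [bne, hb2]
            have hcons : List.filter (fun t => !(PySem.Set.contains seen (pvGetUrl t))) (s :: rest)
                = s :: List.filter (fun t => !(PySem.Set.contains seen (pvGetUrl t))) rest := by
              rw [List.filter_cons]; simp; simpa using h
            rw [hfilter, hcons]
            conv_rhs => rw [pvSieve]
            simp
-- ===== VERDICT (by name: the statement is the Claim_ definition above) =====
theorem deduplicate_discoveries_py_spec : Claim_equal_deduplicate_discoveries_py := by
  intro servers _
  unfold Spec_deduplicate_discoveries_py deduplicate_discoveries_py deduplicate_discoveries_py_alt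
  rw [pvDedupLoop_eq servers.length servers le_rfl PySem.Set.empty [],
    pvSieveLoop_eq servers.length servers le_rfl []]
  have : servers.filter (fun t => !(PySem.Set.contains PySem.Set.empty (pvGetUrl t))) = servers := by
    apply List.filter_eq_self.mpr
    intro t _
    rfl
  rw [this]
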